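-- pv_equiv track=rewrite | github.com/ftang1996/CS122 | projects/PA2/NW_align.py | filter_SNPs
-- ===== SOURCE A (Python) =====
-- def filter_SNPs(changes):
--     new_changes = []
--     snps = filter(lambda x: x[0] == 'SNP', changes)
--     indels = filter(lambda x: x[0] == 'INS' or x[0] == 'DEL', changes)
--     snps = sorted(snps, key=lambda change: change[-1])
--
--     BUFFER = 4
--     for snp in snps:
--         if len(new_changes) == 0:
--             new_changes.append(snp)
--         else:
--             if snp[-1] - new_changes[-1][-1] > BUFFER:
--                 new_changes.append(snp)
--     new_changes.extend(indels)
--     new_changes = sorted(new_changes, key=lambda change: change[-1])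
--     return new_changes
-- ===== SOURCE B (Python) =====
-- def filter_SNPs(changes):
--     # Sort SNPs and indels separately, spacing-filter SNPs with a scalar
--     # 'last kept' position, then combine with a linear two-pointer merge
--     # (ties go to the SNP side) instead of re-sorting the combined list.
--     snps = sorted([c for c in changes if c[0] == 'SNP'], key=lambda c: c[-1])
--     indels = sorted([c for c in changes if c[0] in ('INS', 'DEL')], key=lambda c: c[-1])
--     kept = []
--     last = None
--     for s in snps:
--         if last is None or s[-1] - last > 4:
--             kept.append(s)
--             last = s[-1]
--     out = []
--     i = j = 0
--     while i < len(kept) and j < len(indels):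
--         if kept[i][-1] <= indels[j][-1]:
--             out.append(kept[i]); i += 1
--         else:
--             out.append(indels[j]); j += 1
--     return out + kept[i:] + indels[j:]
-- ===== Notes on version B (the rewrite author's own statement) =====
-- stated objective: alternative
-- what changed: B sorts SNPs and indels separately, tracks the last kept SNP position in a scalar instead of peeking at new_changes[-1], and combines the two sorted lists with a linear two-pointer merge (ties to the SNP side) instead of A's second full sort of the mixed list.
import Mathlib
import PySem

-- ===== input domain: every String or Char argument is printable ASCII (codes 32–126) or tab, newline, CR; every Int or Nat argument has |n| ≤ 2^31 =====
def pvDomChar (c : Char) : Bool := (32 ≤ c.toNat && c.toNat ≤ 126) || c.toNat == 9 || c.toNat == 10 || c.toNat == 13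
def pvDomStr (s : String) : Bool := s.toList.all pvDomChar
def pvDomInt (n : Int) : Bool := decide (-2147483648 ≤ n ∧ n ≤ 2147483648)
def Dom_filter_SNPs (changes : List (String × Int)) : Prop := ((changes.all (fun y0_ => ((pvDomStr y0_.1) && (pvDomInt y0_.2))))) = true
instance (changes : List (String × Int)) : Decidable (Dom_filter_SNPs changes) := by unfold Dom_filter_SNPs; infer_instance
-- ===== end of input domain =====

-- B sorts SNPs and indels separately, spacing-filters SNPs with a scalar last-kept
-- position, and combines the two sorted lists by a linear merge instead of A's
-- second full sort of the mixed list (objective: alternative).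


-- ===== PORT A =====
def filter_SNPs (changes : List (String × Int)) : List (String × Int) :=
  let snps0 := changes.filter (fun x => x.1 == "SNP")
  let indels := changes.filter (fun x => x.1 == "INS" || x.1 == "DEL")
  let snps := PySem.List.sorted snps0 (fun change => change.2)
  let new_changes := snps.foldl (fun new_changes snp =>
    if new_changes.length = 0 then new_changes ++ [snp]
    else if snp.2 - (PySem.List.pyGetD new_changes (-1) ("", 0)).2 > 4 then new_changes ++ [snp]
    else new_changes) []
  PySem.List.sorted (new_changes ++ indels) (fun change => change.2)

-- ===== PORT B =====
-- linear two-pointer merge of two lists, ties taken from the left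
def pvMerge (xs ys : List (String × Int)) : List (String × Int) :=
  match xs, ys with
  | [], ys => ys
  | x :: xs', [] => x :: xs'
  | x :: xs', y :: ys' =>
      if x.2 ≤ y.2 then x :: pvMerge xs' (y :: ys') else y :: pvMerge (x :: xs') ys'

-- spacing filter with a scalar 'last kept' position
def pvPass (snps : List (String × Int)) (kept : List (String × Int)) (last : Option Int) : List (String × Int) :=
  match snps with
  | [] => kept
  | s :: rest =>
      match last with
      | none => pvPass rest (kept ++ [s]) (some s.2)
      | some l => if s.2 - l > 4 then pvPass rest (kept ++ [s]) (some s.2) else pvPass rest kept (some l)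

def filter_SNPs_alt (changes : List (String × Int)) : List (String × Int) :=
  let snps := PySem.List.sorted (changes.filter (fun c => c.1 == "SNP")) (fun c => c.2)
  let indels := PySem.List.sorted (changes.filter (fun c => c.1 == "INS" || c.1 == "DEL")) (fun c => c.2)
  pvMerge (pvPass snps [] none) indels

-- ===== PRECONDITION & SPEC =====
def Spec_filter_SNPs (changes : List (String × Int)) (out : List (String × Int)) : Prop := out = filter_SNPs_alt changes
instance (changes : List (String × Int)) (out : List (String × Int)) : Decidable (Spec_filter_SNPs changes out) := by unfold Spec_filter_SNPs; infer_instance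

-- ===== CLAIM (what is proved, stated in full; the proofs are below) =====
def Claim_equal_filter_SNPs : Prop := ∀ (changes : List (String × Int)), Dom_filter_SNPs changes → Spec_filter_SNPs changes (filter_SNPs changes)

-- ===== LEMMAS AND PROOFS =====

-- abbreviation used in the proofs: the insertion step of PySem's stable sort with key (·.2)
def pvIns (y : String × Int) (zs : List (String × Int)) : List (String × Int) :=
  PySem.List.insertBy (fun a b => decide (a.2 < b.2)) y zs

theorem pvMerge_nil_right (xs : List (String × Int)) : pvMerge xs [] = xs := by
  cases xs <;> simp [pvMerge]

-- inserting a single element is merging with the singleton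
theorem pvIns_eq_merge_singleton (y : String × Int) (zs : List (String × Int)) :
    pvIns y zs = pvMerge zs [y] := by
  induction zs with
  | nil => simp [pvIns, PySem.List.insertBy, pvMerge]
  | cons z zs ih =>
      by_cases h : y.2 < z.2
      · simp [pvIns, PySem.List.insertBy, pvMerge, h, not_le.mpr h]
      · simp [pvIns, PySem.List.insertBy, pvMerge, h, not_lt.mp h, ← ih]

-- insertion commutes with merge (unconditionally)
theorem pvIns_merge (xs s : List (String × Int)) (y : String × Int) :
    pvIns y (pvMerge xs s) = pvMerge xs (pvIns y s) := by
  fun_induction pvMerge xs s with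
  | case1 ys => simp [pvMerge]
  | case2 x xs' =>
      have h1 : pvIns y ([] : List (String × Int)) = [y] := by
        simp [pvIns, PySem.List.insertBy]
      rw [h1]
      exact pvIns_eq_merge_singleton y (x :: xs')
  | case3 x xs' t s' hle ih =>
      have hm : pvMerge (x :: xs') (t :: s') = x :: pvMerge xs' (t :: s') := by
        simp [pvMerge, hle]
      by_cases hy : y.2 < t.2
      · have h1 : pvIns y (t :: s') = y :: t :: s' := by
          simp [pvIns, PySem.List.insertBy, hy]
        by_cases hxy : y.2 < x.2
        · have h3 : pvMerge (x :: xs') (y :: t :: s') = y :: pvMerge (x :: xs') (t :: s') := by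
            simp [pvMerge, not_le.mpr hxy]
          rw [h1, h3, hm]
          simp [pvIns, PySem.List.insertBy, hxy]
        · have h2 : pvIns y (x :: pvMerge xs' (t :: s')) = x :: pvIns y (pvMerge xs' (t :: s')) := by
            simp [pvIns, PySem.List.insertBy, hxy]
          have h3 : pvMerge (x :: xs') (y :: t :: s') = x :: pvMerge xs' (y :: t :: s') := by
            simp [pvMerge, not_lt.mp hxy]
          rw [h2, ih, h1, h3]
      · have h1 : pvIns y (t :: s') = t :: pvIns y s' := by
          simp [pvIns, PySem.List.insertBy, hy]
        have hxy : ¬ y.2 < x.2 := by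
          have := not_lt.mp hy; intro h; exact absurd (le_trans hle this) (not_le.mpr h)
        have h2 : pvIns y (x :: pvMerge xs' (t :: s')) = x :: pvIns y (pvMerge xs' (t :: s')) := by
          simp [pvIns, PySem.List.insertBy, hxy]
        have h3 : pvMerge (x :: xs') (t :: pvIns y s') = x :: pvMerge xs' (t :: pvIns y s') := by
          simp [pvMerge, hle]
        rw [h2, ih, h1, h3]
  | case4 x xs' t s' hle ih =>
      have hm : pvMerge (x :: xs') (t :: s') = t :: pvMerge (x :: xs') s' := by
        simp [pvMerge, hle]
      by_cases hy : y.2 < t.2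
      · have hxy : ¬ x.2 ≤ y.2 := by
          have := not_le.mp hle; intro h; exact absurd (lt_of_le_of_lt h hy) (not_lt.mpr (le_of_lt this))
        have h1 : pvIns y (t :: s') = y :: t :: s' := by
          simp [pvIns, PySem.List.insertBy, hy]
        have h2 : pvIns y (t :: pvMerge (x :: xs') s') = y :: t :: pvMerge (x :: xs') s' := by
          simp [pvIns, PySem.List.insertBy, hy]
        have h3 : pvMerge (x :: xs') (y :: t :: s') = y :: pvMerge (x :: xs') (t :: s') := by
          simp [pvMerge, hxy]
        rw [h2, h1, h3, hm]
      · have h1 : pvIns y (t :: s') = t :: pvIns y s' := by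
          simp [pvIns, PySem.List.insertBy, hy]
        have h2 : pvIns y (t :: pvMerge (x :: xs') s') = t :: pvIns y (pvMerge (x :: xs') s') := by
          simp [pvIns, PySem.List.insertBy, hy]
        have h3 : pvMerge (x :: xs') (t :: pvIns y s') = t :: pvMerge (x :: xs') (pvIns y s') := by
          simp [pvMerge, hle]
        rw [h2, ih, h1, h3]

-- folding insertions into xs is merging xs with the insertion sort of the folded list
theorem foldl_ins_eq_merge (ys xs : List (String × Int)) :
    ys.foldl (fun acc x => pvIns x acc) xs
      = pvMerge xs (ys.foldl (fun acc x => pvIns x acc) []) := by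
  induction ys using List.reverseRecOn generalizing xs with
  | nil => simp [pvMerge_nil_right]
  | append_singleton ys y ih =>
      simp only [List.foldl_append, List.foldl_cons, List.foldl_nil]
      rw [ih xs, pvIns_merge]

-- A's spacing loop equals B's scalar-state pass
theorem foldA_eq_pass_ne (l : List (String × Int)) (acc : List (String × Int)) (x : String × Int) :
    l.foldl (fun new_changes snp =>
      if new_changes.length = 0 then new_changes ++ [snp]
      else if snp.2 - (PySem.List.pyGetD new_changes (-1) ("", 0)).2 > 4 then new_changes ++ [snp]
      else new_changes) (acc ++ [x])
    = pvPass l (acc ++ [x]) (some x.2) := by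
  induction l generalizing acc x with
  | nil => rfl
  | cons s rest ih =>
      simp only [List.foldl_cons, pvPass]
      have hlen : (acc ++ [x]).length ≠ 0 := by simp
      rw [if_neg hlen, PySem.List.pyGetD_neg_one_append_singleton]
      by_cases h : s.2 - x.2 > 4
      · rw [if_pos h, if_pos h]
        have := ih (acc ++ [x]) s
        simpa [List.append_assoc] using this
      · rw [if_neg h, if_neg h]
        exact ih acc x

theorem foldA_eq_pass (l : List (String × Int)) :
    l.foldl (fun new_changes snp =>
      if new_changes.length = 0 then new_changes ++ [snp]
      else if snp.2 - (PySem.List.pyGetD new_changes (-1) ("", 0)).2 > 4 then new_changes ++ [snp]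
      else new_changes) []
    = pvPass l [] none := by
  cases l with
  | nil => rfl
  | cons s rest =>
      simp only [List.foldl_cons, pvPass, List.length_nil, List.nil_append]
      simpa using foldA_eq_pass_ne rest [] s

-- the pass output extends kept by a sublist of the input
theorem pvPass_sublist (l : List (String × Int)) (kept : List (String × Int)) (last : Option Int) :
    ∃ s, pvPass l kept last = kept ++ s ∧ s.Sublist l := by
  induction l generalizing kept last with
  | nil => exact ⟨[], by simp [pvPass]⟩
  | cons x rest ih =>
      cases last with
      | none =>
          obtain ⟨s, hs, hsub⟩ := ih (kept ++ [x]) (some x.2)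
          exact ⟨x :: s, by simpa [pvPass, List.append_assoc] using hs, hsub.cons₂ x⟩
      | some l0 =>
          by_cases h : x.2 - l0 > 4
          · obtain ⟨s, hs, hsub⟩ := ih (kept ++ [x]) (some x.2)
            exact ⟨x :: s, by simpa [pvPass, h, List.append_assoc] using hs, hsub.cons₂ x⟩
          · obtain ⟨s, hs, hsub⟩ := ih kept (some l0)
            exact ⟨s, by simpa [pvPass, h] using hs, hsub.cons x⟩

-- kept is pairwise sorted by position
theorem pvPass_pairwise (snps0 : List (String × Int)) :
    (pvPass (PySem.List.sorted snps0 (fun c => c.2)) [] none).Pairwise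
      (fun a b => a.2 ≤ b.2) := by
  obtain ⟨s, hs, hsub⟩ := pvPass_sublist (PySem.List.sorted snps0 (fun c => c.2)) [] none
  rw [hs, List.nil_append]
  exact (PySem.List.sorted_pairwise snps0 (fun c => c.2)).sublist hsub

-- sorting kept ++ indels is merging kept with sorted indels, when kept is sorted
theorem sorted_append_eq_merge (k ind : List (String × Int))
    (hk : k.Pairwise (fun a b => a.2 ≤ b.2)) :
    PySem.List.sorted (k ++ ind) (fun c => c.2)
      = pvMerge k (PySem.List.sorted ind (fun c => c.2)) := by
  rw [PySem.List.sorted_eq_foldl_insertBy, PySem.List.sorted_eq_foldl_insertBy,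
    List.foldl_append]
  have hself : (k.foldl (fun acc x => pvIns x acc) []) = k := by
    rw [show (fun acc x => pvIns x acc)
        = (fun acc x => PySem.List.insertBy (fun a b => decide (a.2 < b.2)) x acc) from rfl]
    rw [← PySem.List.sorted_eq_foldl_insertBy k (fun c => c.2)]
    exact PySem.List.sorted_eq_self_of_pairwise k (fun c => c.2) hk
  calc ind.foldl (fun acc x => pvIns x acc) (k.foldl (fun acc x => pvIns x acc) [])
      = ind.foldl (fun acc x => pvIns x acc) k := by rw [hself]
    _ = pvMerge k (ind.foldl (fun acc x => pvIns x acc) []) := foldl_ins_eq_merge ind k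

-- ===== VERDICT (by name: the statement is the Claim_ definition above) =====
theorem filter_SNPs_spec : Claim_equal_filter_SNPs := by
  intro changes _
  unfold Spec_filter_SNPs filter_SNPs filter_SNPs_alt
  simp only []
  rw [foldA_eq_pass]
  exact sorted_append_eq_merge _ _ (pvPass_pairwise _)
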